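-- pv_equiv track=rewrite | github.com/agalem/graphAlgorithms_python | zad4/methods.py | find_source
-- ===== SOURCE A (Python) =====
-- def find_source(matrix, size):
--     sources = []
--
--     for colNum in range(size):
--         sum = 0
--         for rowNum in range(size):
--             sum += matrix[rowNum][colNum]
--         if sum == 0:
--             sources.append(colNum + 1)
--
--     return sources
-- ===== SOURCE B (Python) =====
-- def find_source(matrix, size):
--     def colsum(lo, hi, c):
--         # sum of matrix[r][c] for r in [lo, hi), by divide and conquer
--         if lo + 1 == hi:
--             return matrix[lo][c]
--         mid = (lo + hi) // 2
--         return colsum(lo, mid, c) + colsum(mid, hi, c)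
--     return [c + 1 for c in range(size) if colsum(0, size, c) == 0]
-- ===== Notes on version B (the rewrite author's own statement) =====
-- stated objective: alternative
-- what changed: B computes each column total by a recursive divide-and-conquer split of the row range (colsum(lo,hi,c) = colsum(lo,mid,c)+colsum(mid,hi,c)) and builds the result as a comprehension over the columns, instead of A's linear accumulator loops.
import Mathlib
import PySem

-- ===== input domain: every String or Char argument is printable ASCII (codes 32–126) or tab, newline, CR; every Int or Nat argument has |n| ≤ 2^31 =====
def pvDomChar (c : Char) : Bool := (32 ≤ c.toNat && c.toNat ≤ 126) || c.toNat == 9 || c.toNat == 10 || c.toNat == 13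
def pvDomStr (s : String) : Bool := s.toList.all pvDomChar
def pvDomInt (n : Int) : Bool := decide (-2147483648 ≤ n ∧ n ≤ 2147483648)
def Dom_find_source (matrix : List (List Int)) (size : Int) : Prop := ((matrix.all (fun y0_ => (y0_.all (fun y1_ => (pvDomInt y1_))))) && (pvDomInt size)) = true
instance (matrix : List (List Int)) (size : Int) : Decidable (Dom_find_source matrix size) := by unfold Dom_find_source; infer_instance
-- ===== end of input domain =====

-- B computes each column total by recursive divide-and-conquer over the row range instead of
-- A's linear accumulator loops (alternative decomposition, same cost).

-- ===== PORT A =====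
def find_source (matrix : List (List Int)) (size : Int) : List Int :=
  (PySem.List.pyRange 0 size 1).foldl (fun sources colNum =>
    let sum :=
      (PySem.List.pyRange 0 size 1).foldl (fun s rowNum =>
        s + PySem.List.pyGetD (PySem.List.pyGetD matrix rowNum []) colNum 0) 0
    if sum = 0 then sources ++ [colNum + 1] else sources) []

-- ===== PORT B =====
-- colsum(lo, hi, c): divide-and-conquer sum of matrix[r][c] for r in [lo, hi).
-- Python only ever calls it with lo < hi; the final 'else 0' branch is a termination
-- guard for the (never reached in Python) case hi ≤ lo.
def pvColsum (matrix : List (List Int)) (lo hi c : Int) : Int :=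
  if lo + 1 = hi then
    PySem.List.pyGetD (PySem.List.pyGetD matrix lo []) c 0
  else if _h : lo + 1 < hi then
    -- mid = (lo + hi) // 2
    pvColsum matrix lo (PySem.Int.floordiv (lo + hi) 2) c +
      pvColsum matrix (PySem.Int.floordiv (lo + hi) 2) hi c
  else 0
termination_by (hi - lo).toNat
decreasing_by
  · have hm : PySem.Int.floordiv (lo + hi) 2 = (lo + hi) / 2 :=
      PySem.Int.floordiv_eq_ediv_of_pos (by omega)
    omega
  · have hm : PySem.Int.floordiv (lo + hi) 2 = (lo + hi) / 2 :=
      PySem.Int.floordiv_eq_ediv_of_pos (by omega)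
    omega

def find_source_alt (matrix : List (List Int)) (size : Int) : List Int :=
  ((PySem.List.pyRange 0 size 1).filter
    (fun c => pvColsum matrix 0 size c == 0)).map (fun c => c + 1)

-- ===== PRECONDITION & SPEC =====
-- Pre_ excludes exactly the inputs on which Python A raises IndexError:
-- 0 < size but the matrix has fewer than size rows, or one of its first size rows
-- has fewer than size columns.
def Pre_find_source (matrix : List (List Int)) (size : Int) : Prop :=
  0 < size → (size.toNat ≤ matrix.length ∧
    ∀ r ∈ matrix.take size.toNat, size.toNat ≤ r.length)
instance (matrix : List (List Int)) (size : Int) : Decidable (Pre_find_source matrix size) := by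
  unfold Pre_find_source; infer_instance

def pvWitness_find_source : List (List Int) × Int := ([[1, -1], [-1, 1]], 2)

def Spec_find_source (matrix : List (List Int)) (size : Int) (out : List Int) : Prop := out = find_source_alt matrix size
instance (matrix : List (List Int)) (size : Int) (out : List Int) : Decidable (Spec_find_source matrix size out) := by unfold Spec_find_source; infer_instance

-- ===== CLAIM (what is proved, stated in full; the proofs are below) =====
def Claim_equal_find_source : Prop := ∀ (matrix : List (List Int)) (size : Int), Dom_find_source matrix size → Pre_find_source matrix size → Spec_find_source matrix size (find_source matrix size)

-- ===== LEMMAS AND PROOFS =====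

-- linear reference sum of matrix[r][c] for r in [lo, hi)
def pvSsum (matrix : List (List Int)) (c lo hi : Int) : Int :=
  if lo < hi then
    PySem.List.pyGetD (PySem.List.pyGetD matrix lo []) c 0 + pvSsum matrix c (lo + 1) hi
  else 0
termination_by (hi - lo).toNat

theorem pvSsum_pos (matrix : List (List Int)) (c lo hi : Int) (h : lo < hi) :
    pvSsum matrix c lo hi =
      PySem.List.pyGetD (PySem.List.pyGetD matrix lo []) c 0 + pvSsum matrix c (lo + 1) hi := by
  rw [pvSsum, if_pos h]

theorem pvSsum_nonpos (matrix : List (List Int)) (c lo hi : Int) (h : ¬ lo < hi) :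
    pvSsum matrix c lo hi = 0 := by
  rw [pvSsum, if_neg h]

theorem pvSsum_split (matrix : List (List Int)) (c : Int) :
    ∀ (n : Nat) (lo mid hi : Int), (mid - lo).toNat = n → lo ≤ mid → mid ≤ hi →
      pvSsum matrix c lo hi = pvSsum matrix c lo mid + pvSsum matrix c mid hi := by
  intro n
  induction n with
  | zero =>
    intro lo mid hi hn h1 h2
    have : lo = mid := by omega
    subst this
    rw [pvSsum_nonpos matrix c lo lo (by omega)]
    ring
  | succ k ih =>
    intro lo mid hi hn h1 h2
    rw [pvSsum_pos matrix c lo hi (by omega), pvSsum_pos matrix c lo mid (by omega),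
      ih (lo + 1) mid hi (by omega) (by omega) h2]
    ring

theorem pvColsum_eq_pvSsum (matrix : List (List Int)) (c : Int) :
    ∀ (n : Nat) (lo hi : Int), (hi - lo).toNat = n → lo < hi →
      pvColsum matrix lo hi c = pvSsum matrix c lo hi := by
  intro n
  induction n using Nat.strong_induction_on with
  | _ n ih =>
    intro lo hi hn hlt
    rw [pvColsum]
    by_cases h1 : lo + 1 = hi
    · rw [if_pos h1, pvSsum_pos matrix c lo hi hlt, pvSsum_nonpos matrix c (lo + 1) hi (by omega)]
      ring
    · rw [if_neg h1, dif_pos (by omega)]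
      have hm : PySem.Int.floordiv (lo + hi) 2 = (lo + hi) / 2 :=
        PySem.Int.floordiv_eq_ediv_of_pos (by omega)
      have hmid1 : lo < PySem.Int.floordiv (lo + hi) 2 := by rw [hm]; omega
      have hmid2 : PySem.Int.floordiv (lo + hi) 2 < hi := by rw [hm]; omega
      rw [ih (PySem.Int.floordiv (lo + hi) 2 - lo).toNat (by omega) _ _ rfl hmid1,
        ih (hi - PySem.Int.floordiv (lo + hi) 2).toNat (by omega) _ _ rfl hmid2,
        ← pvSsum_split matrix c (PySem.Int.floordiv (lo + hi) 2 - lo).toNat lo _ hi rfl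
          (by omega) (by omega)]

-- A\'s inner accumulator loop computes the same linear sum
theorem inner_loop_eq_pvSsum (matrix : List (List Int)) (c : Int) :
    ∀ (n : Nat) (lo hi : Int) (s0 : Int), (hi - lo).toNat = n →
      (PySem.List.pyRange lo hi 1).foldl (fun s rowNum =>
        s + PySem.List.pyGetD (PySem.List.pyGetD matrix rowNum []) c 0) s0 =
      s0 + pvSsum matrix c lo hi := by
  intro n
  induction n with
  | zero =>
    intro lo hi s0 hn
    rw [PySem.List.pyRange_one_eq_nil (by omega), List.foldl_nil,
      pvSsum_nonpos matrix c lo hi (by omega)]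
    ring
  | succ k ih =>
    intro lo hi s0 hn
    rw [PySem.List.pyRange_one_cons (by omega), List.foldl_cons,
      ih (lo + 1) hi _ (by omega), pvSsum_pos matrix c lo hi (by omega)]
    ring

-- ===== VERDICT (by name: the statement is the Claim_ definition above) =====
theorem find_source_spec : Claim_equal_find_source := by
  intro matrix size _ _
  unfold Spec_find_source find_source find_source_alt
  show (PySem.List.pyRange 0 size 1).foldl (fun sources colNum =>
      if (PySem.List.pyRange 0 size 1).foldl (fun s rowNum =>
          s + PySem.List.pyGetD (PySem.List.pyGetD matrix rowNum []) colNum 0) 0 = 0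
      then sources ++ [colNum + 1] else sources) [] = _
  have h1 : (PySem.List.pyRange 0 size 1).foldl (fun sources colNum =>
      if (PySem.List.pyRange 0 size 1).foldl (fun s rowNum =>
          s + PySem.List.pyGetD (PySem.List.pyGetD matrix rowNum []) colNum 0) 0 = 0
      then sources ++ [colNum + 1] else sources) [] =
      (PySem.List.pyRange 0 size 1).foldl (fun sources c =>
        if pvColsum matrix 0 size c == 0 then sources ++ [c + 1] else sources) [] := by
    apply PySem.List.foldl_congr_mem
    intro sources c _
    by_cases hsz : 0 < size
    · simp only [inner_loop_eq_pvSsum matrix c (size - 0).toNat 0 size 0 rfl,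
        pvColsum_eq_pvSsum matrix c (size - 0).toNat 0 size rfl hsz, zero_add, beq_iff_eq]
    · rw [PySem.List.pyRange_one_eq_nil (by omega)]
      have h0 : pvColsum matrix 0 size c = 0 := by
        rw [pvColsum, if_neg (by omega), dif_neg (by omega)]
      simp [h0]
  rw [h1, PySem.List.foldl_append_if
    (fun c => pvColsum matrix 0 size c == 0) (fun c => c + 1)]
  simp
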